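-- pv_equiv track=rewrite | github.com/DannyDannyDanny/midi-to-guitar-tab | moodoo_dev.py | tuple_to_visual
-- ===== SOURCE A (Python) =====
-- def tuple_to_visual(t):
--     """
--     given a (string,fret)-tuple return visual string
--     example:
--     input: (2,11)
--     output: '| | 11| | | '
--     """
--     def fill(x):
--         """returns 2-char long str cast of some input"""
--         if len(str(x)) == 1:
--             return str(x)+' '
--         else:
--             return str(x)
--
--     s = ''
--     for i in range(6):
--         if i == t[0]:
--             s += fill(t[1])
--         else:
--             s += '| '
--     return s
-- ===== SOURCE B (Python) =====
-- def tuple_to_visual(t):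
--     """Build the tab line by direct string arithmetic instead of scanning range(6)."""
--     def fill(x):
--         """returns 2-char long str cast of some input"""
--         if len(str(x)) == 1:
--             return str(x) + ' '
--         else:
--             return str(x)
--
--     s, fret = t
--     if 0 <= s < 6:
--         return '| ' * s + fill(fret) + '| ' * (5 - s)
--     return '| ' * 6
-- ===== Notes on version B (the rewrite author's own statement) =====
-- stated objective: simpler
-- what changed: Replaces the range(6) scan with per-cell comparison by direct string arithmetic: '| '*s + fill(fret) + '| '*(5-s) when the string index is 0..5, else a plain bar line.
import Mathlib
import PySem

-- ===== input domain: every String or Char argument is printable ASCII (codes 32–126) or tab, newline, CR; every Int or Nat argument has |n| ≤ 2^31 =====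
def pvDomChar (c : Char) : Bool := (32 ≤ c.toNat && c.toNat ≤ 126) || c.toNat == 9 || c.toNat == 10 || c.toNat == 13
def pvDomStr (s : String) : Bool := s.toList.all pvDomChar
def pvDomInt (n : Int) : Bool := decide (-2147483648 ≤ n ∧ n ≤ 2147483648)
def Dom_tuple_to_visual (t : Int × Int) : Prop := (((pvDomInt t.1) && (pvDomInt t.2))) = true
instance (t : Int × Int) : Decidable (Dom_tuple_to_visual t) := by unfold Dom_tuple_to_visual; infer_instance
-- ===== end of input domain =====

-- B replaces A's range(6) scan with direct string arithmetic (bars·fill·bars, guarded on the index): simpler, same cost.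
-- ===== PORT A =====
-- fill(x): two-char string cast of x (shared textually by both Pythons)
def fillChars (x : Int) : List Char :=
  if (PySem.Int.toChars x).length = 1 then PySem.Int.toChars x ++ [' ']
  else PySem.Int.toChars x

-- A: scan i in range(6), appending fill(t[1]) at i == t[0], else '| '
def tuple_to_visual (t : Int × Int) : String :=
  String.ofList ((PySem.List.pyRange 0 6 1).foldl
    (fun s i => s ++ (if i = t.1 then fillChars t.2 else ['|', ' '])) [])

-- ===== PORT B =====
-- '| ' * n  (Python string repetition)
def barsChars (n : Nat) : List Char := (List.replicate n ['|', ' ']).flatten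

-- B: direct string arithmetic, guarded on the string index
def tuple_to_visual_alt (t : Int × Int) : String :=
  if 0 ≤ t.1 ∧ t.1 < 6 then
    String.ofList (barsChars t.1.toNat ++ fillChars t.2 ++ barsChars (5 - t.1.toNat))
  else
    String.ofList (barsChars 6)

-- ===== PRECONDITION & SPEC =====
def Spec_tuple_to_visual (t : Int × Int) (out : String) : Prop := out = tuple_to_visual_alt t
instance (t : Int × Int) (out : String) : Decidable (Spec_tuple_to_visual t out) := by unfold Spec_tuple_to_visual; infer_instance

-- ===== CLAIM (what is proved, stated in full; the proofs are below) =====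
def Claim_equal_tuple_to_visual : Prop := ∀ (t : Int × Int), Dom_tuple_to_visual t → Spec_tuple_to_visual t (tuple_to_visual t)

-- ===== LEMMAS AND PROOFS =====

-- ===== VERDICT (by name: the statement is the Claim_ definition above) =====
theorem tuple_to_visual_spec : Claim_equal_tuple_to_visual := by
  intro t _
  obtain ⟨a, b⟩ := t
  unfold Spec_tuple_to_visual tuple_to_visual tuple_to_visual_alt
  have hrange : PySem.List.pyRange 0 6 1 = [0, 1, 2, 3, 4, 5] := by decide
  by_cases h : 0 ≤ a ∧ a < 6
  · obtain ⟨h1, h2⟩ := h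
    interval_cases a <;>
      simp [hrange, List.foldl, barsChars, List.replicate]
  · rw [if_neg h]
    simp only [hrange, List.foldl]
    split_ifs <;> first | omega | rfl
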